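-- pv_equiv track=rewrite | github.com/shubhamgyd/mission_TCS | Chegg/94_Interesting_Hotels.py | hotels
-- ===== SOURCE A (Python) =====
-- def hotels(n,k,a):
--     # store the indices
--     ans=[]
--     # iterate array
--     for j in range(n):
--         # if k elements are available
--         if j+k<=n-1:
--             cnt=0
--             # count if next k elements are smaller than current element or not
--             for l in range(j+1,j+k+1):
--                 # if smaller then increase the count
--                 if a[l]<a[j]:
--                     cnt=cnt+1
--             # if total count is k
--             # then append the index to answer
--             if cnt==k:
--                 ans.append(j)
--         # if not sufficient k elements are available
--         # then check all next remaining elements are strictly shorter than current element or not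
--         else:
--             cnt=0
--             # count if next k elements are smaller than current element or not
--             for l in range(j+1,n):
--                 # if smaller then increase the count
--                 if a[l]<a[j]:
--                     cnt=cnt+1
--             # if all remaining elements are strictly lesser than the current element
--             # append its index
--             if cnt==n-j-1:
--                 ans.append(j)
--     # return ans
--     return ans
-- ===== SOURCE B (Python) =====
-- def hotels(n, k, a):
--     # O(n) right-to-left pass: a monotonic stack yields, for each j, the nearest index
--     # to the right whose value is >= a[j]; j qualifies iff that index lies beyond the window.
--     ans = []
--     stack = []  # indices i > j, candidates for the next >= element
--     for j in range(n - 1, -1, -1):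
--         while stack and a[stack[-1]] < a[j]:
--             stack.pop()
--         nge = stack[-1] if stack else n  # first index right of j with a value >= a[j]
--         if nge - j > k or nge == n:
--             ans.append(j)
--         stack.append(j)
--     ans.reverse()
--     return ans
-- ===== Notes on version B (the rewrite author's own statement) =====
-- stated objective: faster
-- what changed: Replaced the per-index rescan of the next k elements by a single right-to-left pass with a monotonic stack that yields, for each index, the nearest index to the right holding a value >= a[j]; j qualifies iff that index lies beyond the k-window.
-- outside the precondition, e.g. on hotels(2, 0, []): A returns [0, 1], B raises IndexError; on hotels(2, -1, [5, 3]): A returns [], B returns [0, 1]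
import Mathlib
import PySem

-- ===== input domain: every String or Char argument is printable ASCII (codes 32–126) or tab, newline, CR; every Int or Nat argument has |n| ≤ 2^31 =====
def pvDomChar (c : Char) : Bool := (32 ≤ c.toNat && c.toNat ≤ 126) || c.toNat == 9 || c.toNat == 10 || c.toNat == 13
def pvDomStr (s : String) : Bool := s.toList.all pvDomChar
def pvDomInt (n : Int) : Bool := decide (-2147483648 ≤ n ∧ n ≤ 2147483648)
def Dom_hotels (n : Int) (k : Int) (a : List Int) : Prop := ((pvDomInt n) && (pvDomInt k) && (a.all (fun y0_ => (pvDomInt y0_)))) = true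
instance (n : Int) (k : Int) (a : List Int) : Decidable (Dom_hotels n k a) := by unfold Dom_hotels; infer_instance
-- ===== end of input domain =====

-- B replaces A's O(n*k) per-index rescan of the next k elements by a single O(n)
-- right-to-left monotonic-stack pass (nearest index to the right with a value >= a[j]).

-- ===== PORT A =====
def hotels (n : Int) (k : Int) (a : List Int) : List Int :=
  (PySem.List.pyRange 0 n 1).foldl (fun ans j =>
    if j + k ≤ n - 1 then
      let cnt := (PySem.List.pyRange (j+1) (j+k+1) 1).foldl
        (fun cnt l => if PySem.List.pyGetD a l 0 < PySem.List.pyGetD a j 0 then cnt + 1 else cnt) (0 : Int)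
      if cnt = k then ans ++ [j] else ans
    else
      let cnt := (PySem.List.pyRange (j+1) n 1).foldl
        (fun cnt l => if PySem.List.pyGetD a l 0 < PySem.List.pyGetD a j 0 then cnt + 1 else cnt) (0 : Int)
      if cnt = n - j - 1 then ans ++ [j] else ans) []

-- ===== PORT B =====
-- Python's `while stack and a[stack[-1]] < a[j]: stack.pop()`; the stack is kept head = top.
def popSmaller (a : List Int) (x : Int) : List Int → List Int
  | [] => []
  | t :: rest => if PySem.List.pyGetD a t 0 < x then popSmaller a x rest else t :: rest

-- one iteration of B's loop: pop, read the next >= index (n if none), test, push j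
def altStep (n : Int) (k : Int) (a : List Int) (st : List Int × List Int) (j : Int) : List Int × List Int :=
  let stack := popSmaller a (PySem.List.pyGetD a j 0) st.2
  let nge : Int := match stack with | [] => n | t :: _ => t
  let ans := if nge - j > k ∨ nge = n then st.1 ++ [j] else st.1
  (ans, j :: stack)

def hotels_alt (n : Int) (k : Int) (a : List Int) : List Int :=
  let res := (PySem.List.pyRange (n-1) (-1) (-1)).foldl (altStep n k a) (([], []) : List Int × List Int)
  res.1.reverse

-- ===== PRECONDITION & SPEC =====
-- Pre_ excludes (for n > 0, where the loop runs) n > len(a), on which A raises IndexError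
-- whenever it reads an element (and B, which reads a[j] for every j < n, always raises;
-- A returns only in the degenerate k ≤ 0 cases), and k < 0, a count outside the task's
-- natural domain (A returns [] there only because cnt == k can never hold, while B's
-- vacuous empty-window test accepts every index); for n ≤ 0 both loops are empty.
def Pre_hotels (n : Int) (k : Int) (a : List Int) : Prop := n ≤ 0 ∨ (0 ≤ k ∧ n ≤ (a.length : Int))
instance (n : Int) (k : Int) (a : List Int) : Decidable (Pre_hotels n k a) := by
  unfold Pre_hotels; infer_instance

def pvWitness_hotels : Int × Int × List Int := (4, 2, [5, 1, 2, 3])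

def Spec_hotels (n : Int) (k : Int) (a : List Int) (out : List Int) : Prop := out = hotels_alt n k a
instance (n : Int) (k : Int) (a : List Int) (out : List Int) : Decidable (Spec_hotels n k a out) := by
  unfold Spec_hotels; infer_instance

-- ===== CLAIM (what is proved, stated in full; the proofs are below) =====
def Claim_equal_hotels : Prop := ∀ (n : Int) (k : Int) (a : List Int), Dom_hotels n k a → Pre_hotels n k a → Spec_hotels n k a (hotels n k a)

-- ===== LEMMAS AND PROOFS =====

-- value of the (virtual) array at index t
def pvVal (a : List Int) (t : Int) : Int := PySem.List.pyGetD a t 0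

-- the common characterisation: index j qualifies iff every element of the window
-- (j, min(j+k+1, n)) is strictly smaller than a[j]
def goodB (n k : Int) (a : List Int) (j : Int) : Bool :=
  (PySem.List.pyRange (j+1) (min (j+k+1) n) 1).all (fun l => pvVal a l < pvVal a j)

-- the stack invariant: an ascending chain of indices < n with non-decreasing values,
-- each gap (and the tail beyond the last element) dominated by the element before it
def Chain (a : List Int) (n : Int) : List Int → Prop
  | [] => True
  | t :: rest =>
      t < n ∧
      (match rest with
       | [] => ∀ p : Int, t < p → p < n → pvVal a p < pvVal a t
       | u :: _ => t < u ∧ pvVal a t ≤ pvVal a u ∧ (∀ p : Int, t < p → p < u → pvVal a p < pvVal a t)) ∧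
      Chain a n rest

-- A's branch test, as a Bool predicate on j (same counting folds as the port)
def aCond (n k : Int) (a : List Int) (j : Int) : Bool :=
  if j + k ≤ n - 1 then
    decide ((PySem.List.pyRange (j+1) (j+k+1) 1).foldl
      (fun cnt l => if PySem.List.pyGetD a l 0 < PySem.List.pyGetD a j 0 then cnt + 1 else cnt) (0 : Int) = k)
  else
    decide ((PySem.List.pyRange (j+1) n 1).foldl
      (fun cnt l => if PySem.List.pyGetD a l 0 < PySem.List.pyGetD a j 0 then cnt + 1 else cnt) (0 : Int) = n - j - 1)

lemma count_fold_eq (a : List Int) (x : Int) (l : List Int) (c : Int) :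
    l.foldl (fun cnt v => if PySem.List.pyGetD a v 0 < x then cnt + 1 else cnt) c
      = c + ((l.filter (fun v => PySem.List.pyGetD a v 0 < x)).length : Int) := by
  induction l generalizing c with
  | nil => simp
  | cons h t ih =>
    by_cases hv : PySem.List.pyGetD a h 0 < x
    · simp [hv, ih]; ring
    · simp [hv, ih]

lemma pop_spec (a : List Int) (n x : Int) :
    ∀ s : List Int, Chain a n s →
      Chain a n (popSmaller a x s) ∧
      (∀ t r, popSmaller a x s = t :: r → x ≤ pvVal a t) ∧
      (s.headD n ≤ (popSmaller a x s).headD n ∧ (popSmaller a x s).headD n ≤ n) ∧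
      (∀ p : Int, s.headD n ≤ p → p < (popSmaller a x s).headD n → p < n → pvVal a p < x) := by
  intro s
  induction s with
  | nil =>
    intro _
    refine ⟨trivial, by intro t r h; simp [popSmaller] at h, ⟨le_refl _, le_refl _⟩, ?_⟩
    intro p h1 h2 h3
    simp only [popSmaller, List.headD_nil] at h1 h2
    omega
  | cons t rest ih =>
    intro hc
    obtain ⟨htn, hloc, hrest⟩ := hc
    by_cases hv : PySem.List.pyGetD a t 0 < x
    · -- popped: recurse on rest
      have hres := ih hrest
      obtain ⟨ih1, ih2, ⟨ih3a, ih3b⟩, ih4⟩ := hres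
      have hpop : popSmaller a x (t :: rest) = popSmaller a x rest := by
        simp only [popSmaller, if_pos hv]
      rw [hpop]
      have hhead : t ≤ rest.headD n := by
        cases rest with
        | nil => simpa using le_of_lt htn
        | cons u r => simpa using le_of_lt hloc.1
      refine ⟨ih1, ih2, ⟨le_trans hhead ih3a, ih3b⟩, ?_⟩
      intro p hp1 hp2 hp3
      simp only [List.headD_cons] at hp1
      by_cases hlt : p < rest.headD n
      · -- p in [t, rest.headD): p = t or in the gap of the first link
        rcases eq_or_lt_of_le hp1 with rfl | hgt
        · exact hv
        · cases rest with
          | nil =>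
            simp only [List.headD_nil] at hlt
            exact lt_trans (hloc p hgt hp3) hv
          | cons u r =>
            simp only [List.headD_cons] at hlt
            exact lt_trans (hloc.2.2 p hgt hlt) hv
      · exact ih4 p (by omega) hp2 hp3
    · -- kept
      have hpop : popSmaller a x (t :: rest) = t :: rest := by
        simp only [popSmaller, if_neg hv]
      rw [hpop]
      refine ⟨⟨htn, hloc, hrest⟩, ?_, ⟨le_refl _, ?_⟩, ?_⟩
      · intro t' r' h; cases h; exact not_lt.mp hv
      · simpa using le_of_lt htn
      · intro p hp1 hp2 hp3
        simp only [List.headD_cons] at hp1 hp2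
        omega

lemma altStep_pair (n k : Int) (a : List Int) (ans s : List Int) (j : Int) :
    altStep n k a (ans, s) j =
      (if (popSmaller a (PySem.List.pyGetD a j 0) s).headD n - j > k ∨
          (popSmaller a (PySem.List.pyGetD a j 0) s).headD n = n
       then ans ++ [j] else ans,
       j :: popSmaller a (PySem.List.pyGetD a j 0) s) := by
  cases hs : popSmaller a (PySem.List.pyGetD a j 0) s <;> simp [altStep, hs]

lemma fold_alt (n k : Int) (a : List Int) :
    ∀ (m : ℕ), (m : Int) ≤ n → ∀ (ans s : List Int), Chain a n s → s.headD n = (m : Int) →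
      (((PySem.List.pyRange ((m : Int) - 1) (-1) (-1)).foldl (altStep n k a) (ans, s)).1)
        = ans ++ (PySem.List.pyRange ((m : Int) - 1) (-1) (-1)).filter (goodB n k a) := by
  intro m
  induction m with
  | zero =>
    intro _ ans s _ _
    rw [PySem.List.pyRange_neg_one_eq_nil (by norm_num)]
    simp
  | succ m ih =>
    intro hm ans s hc hh
    have hcast : ((m + 1 : ℕ) : Int) = (m : Int) + 1 := by push_cast; ring
    rw [hcast] at hm hh
    have hrw : ((m + 1 : ℕ) : Int) - 1 = (m : Int) := by omega
    rw [hrw, PySem.List.pyRange_neg_one_cons (by omega), List.foldl_cons, altStep_pair]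
    have hpv : PySem.List.pyGetD a ((m : Int)) 0 = pvVal a (m : Int) := rfl
    rw [hpv]
    obtain ⟨hc', hval, ⟨hmono, hle⟩, hcov⟩ := pop_spec a n (pvVal a (m : Int)) s hc
    rw [hh] at hmono hcov
    generalize hP : popSmaller a (pvVal a (m : Int)) s = P at hc' hval hmono hle hcov ⊢
    have hjn : (m : Int) < n := by omega
    -- the loop condition is exactly goodB at m
    have hgood : (P.headD n - (m : Int) > k ∨ P.headD n = n) ↔ goodB n k a (m : Int) = true := by
      rw [goodB, List.all_eq_true]
      constructor
      · intro hcnd l hl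
        rw [PySem.List.mem_pyRange_one] at hl
        have hlH : l < P.headD n := by rcases hcnd with h | h <;> omega
        simpa using hcov l (by omega) hlH (by omega)
      · intro hg
        cases P with
        | nil => right; rfl
        | cons t r =>
          have htn : t < n := hc'.1
          by_contra hcnd
          push Not at hcnd
          simp only [List.headD_cons] at hcnd hmono
          have := hg t (by rw [PySem.List.mem_pyRange_one]; omega)
          simp only [decide_eq_true_eq] at this
          have hxt : pvVal a (m : Int) ≤ pvVal a t := hval t r rfl
          omega
    -- the new stack is again a chain headed by m
    have hchain : Chain a n ((m : Int) :: P) := by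
      refine ⟨hjn, ?_, hc'⟩
      cases P with
      | nil =>
        intro p hp1 hp2
        exact hcov p (by omega) (by simpa using hp2) hp2
      | cons t r =>
        have htn : t < n := hc'.1
        simp only [List.headD_cons] at hmono hcov
        exact ⟨by omega, hval t r rfl, fun p hp1 hp2 => hcov p (by omega) hp2 (by omega)⟩
    rw [ih (by omega) _ _ hchain (by simp), List.filter_cons]
    by_cases hgb : goodB n k a (m : Int) = true
    · rw [if_pos (hgood.mpr hgb), hgb]
      simp
    · rw [if_neg (fun hcnd => hgb (hgood.mp hcnd)), Bool.eq_false_iff.mpr hgb]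
      simp

lemma alt_eq_filter (n k : Int) (a : List Int) :
    hotels_alt n k a = (PySem.List.pyRange 0 n 1).filter (goodB n k a) := by
  unfold hotels_alt
  by_cases hn : n ≤ 0
  · rw [PySem.List.pyRange_neg_one_eq_nil (by omega),
      PySem.List.pyRange_one_eq_nil (by omega)]
    rfl
  · have hcast : (n.toNat : Int) = n := by omega
    have h := fold_alt n k a n.toNat (by omega) [] [] trivial (by simp [hcast])
    rw [hcast] at h
    show (List.foldl (altStep n k a) ([], []) (PySem.List.pyRange (n - 1) (-1) (-1))).1.reverse = _
    rw [h, List.nil_append, PySem.List.pyRange_neg_one_eq_reverse]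
    have : (-1 : Int) + 1 = 0 := by norm_num
    rw [this, show n - 1 + 1 = n by ring, List.filter_reverse, List.reverse_reverse]

lemma a_eq_filter (n k : Int) (a : List Int) (hk : 0 ≤ k) :
    hotels n k a = (PySem.List.pyRange 0 n 1).filter (goodB n k a) := by
  unfold hotels
  have hbody : (fun (ans : List Int) (j : Int) =>
      if j + k ≤ n - 1 then
        let cnt := (PySem.List.pyRange (j+1) (j+k+1) 1).foldl
          (fun cnt l => if PySem.List.pyGetD a l 0 < PySem.List.pyGetD a j 0 then cnt + 1 else cnt) (0 : Int)
        if cnt = k then ans ++ [j] else ans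
      else
        let cnt := (PySem.List.pyRange (j+1) n 1).foldl
          (fun cnt l => if PySem.List.pyGetD a l 0 < PySem.List.pyGetD a j 0 then cnt + 1 else cnt) (0 : Int)
        if cnt = n - j - 1 then ans ++ [j] else ans)
      = fun ans j => if aCond n k a j then ans ++ [j] else ans := by
    funext ans j
    by_cases h1 : j + k ≤ n - 1 <;> (simp [aCond, h1])
  rw [hbody, PySem.List.foldl_append_if_eq_filter, List.nil_append]
  apply List.filter_congr
  intro j hj
  rw [PySem.List.mem_pyRange_one] at hj
  have hval : ∀ (lo hi : Int), lo ≤ hi →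
      ((PySem.List.pyRange lo hi 1).foldl
        (fun cnt l => if PySem.List.pyGetD a l 0 < PySem.List.pyGetD a j 0 then cnt + 1 else cnt) (0 : Int)
        = hi - lo
      ↔ ∀ l ∈ PySem.List.pyRange lo hi 1, pvVal a l < pvVal a j) := by
    intro lo hi hlohi
    rw [count_fold_eq, zero_add]
    have hlen : ((PySem.List.pyRange lo hi 1).length : Int) = hi - lo := by
      rw [PySem.List.length_pyRange_one]; omega
    constructor
    · intro hcnt
      have : ((PySem.List.pyRange lo hi 1).filter
          (fun v => decide (PySem.List.pyGetD a v 0 < PySem.List.pyGetD a j 0))).length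
          = (PySem.List.pyRange lo hi 1).length := by omega
      have hall := List.length_filter_eq_length_iff.mp this
      intro l hl
      simpa using hall l hl
    · intro hall
      have : ((PySem.List.pyRange lo hi 1).filter
          (fun v => decide (PySem.List.pyGetD a v 0 < PySem.List.pyGetD a j 0))).length
          = (PySem.List.pyRange lo hi 1).length := by
        apply List.length_filter_eq_length_iff.mpr
        intro l hl
        simpa using hall l hl
      omega
  have hgb : (goodB n k a j = true)
      ↔ ∀ l ∈ PySem.List.pyRange (j+1) (min (j+k+1) n) 1, pvVal a l < pvVal a j := by
    rw [goodB, List.all_eq_true]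
    constructor
    · intro h l hl; simpa using h l hl
    · intro h l hl; simpa using h l hl
  rw [Bool.eq_iff_iff, hgb]
  unfold aCond
  by_cases h1 : j + k ≤ n - 1
  · rw [if_pos h1]
    have hmin : min (j+k+1) n = j+k+1 := by omega
    rw [hmin, decide_eq_true_eq]
    have := hval (j+1) (j+k+1) (by omega)
    rw [show j+k+1 - (j+1) = k by ring] at this
    exact this
  · rw [if_neg h1]
    have hmin : min (j+k+1) n = n := by omega
    rw [hmin, decide_eq_true_eq]
    have := hval (j+1) n (by omega)
    rw [show n - (j+1) = n - j - 1 by ring] at this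
    exact this

-- ===== VERDICT (by name: the statement is the Claim_ definition above) =====
theorem hotels_spec : Claim_equal_hotels := by
  intro n k a _hdom hpre
  unfold Spec_hotels
  rcases hpre with hn | ⟨hk, _⟩
  · rw [alt_eq_filter]
    unfold hotels
    rw [PySem.List.pyRange_one_eq_nil (by omega)]
    rfl
  · rw [a_eq_filter n k a hk, alt_eq_filter]
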